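-- pv_equiv track=rewrite | github.com/Geetanjali1481/CSC-370 | Homework 3/Dirsort.py | dirsort
-- ===== SOURCE A (Python) =====
-- import collections
--
-- def dirsort(dirs): #Dirsort functions
--     sorted_dirs = [] #Declaring empty list
--     dict = collections.defaultdict(list)
--     for i in range(len(dirs)):
--         dict[dirs[i].count('/')].append(dirs[i])
--
--     for key in sorted(dict.keys()):
--         dict.get(key).sort()
--         for j in dict.get(key):
--             sorted_dirs.append(j)
--     return sorted_dirs #Returns sorted directory
-- ===== SOURCE B (Python) =====
-- def dirsort(dirs):
--     return sorted(dirs, key=lambda d: (d.count('/'), d))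
-- ===== Notes on version B (the rewrite author's own statement) =====
-- stated objective: simpler
-- what changed: replaces A's group-by-slash-count dict, per-bucket in-place sorts and key-ordered concatenation with a single stable sort keyed by the tuple (slash count, string)
import Mathlib
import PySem

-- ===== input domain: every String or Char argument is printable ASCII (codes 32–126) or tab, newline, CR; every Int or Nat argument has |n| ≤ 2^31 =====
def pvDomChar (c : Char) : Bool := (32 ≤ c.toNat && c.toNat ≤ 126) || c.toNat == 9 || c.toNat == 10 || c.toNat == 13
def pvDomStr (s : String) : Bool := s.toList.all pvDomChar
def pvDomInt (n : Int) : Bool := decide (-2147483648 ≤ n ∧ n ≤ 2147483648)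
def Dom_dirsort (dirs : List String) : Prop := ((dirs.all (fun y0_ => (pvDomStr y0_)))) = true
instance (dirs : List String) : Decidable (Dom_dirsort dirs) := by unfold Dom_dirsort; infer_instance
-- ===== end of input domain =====

-- B replaces A's group-by-slash-count dict, per-bucket sorts and key-ordered
-- concatenation with one stable sort on the composite key (slash count, string);
-- objective: simpler.

-- ===== PORT A =====
def dirsort (dirs : List String) : List String :=
  -- dict = defaultdict(list); for i in range(len(dirs)): dict[dirs[i].count('/')].append(dirs[i])
  let dct : PySem.Dict Nat (List String) :=
    (PySem.List.pyRange 0 (PySem.List.len dirs) 1).foldl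
      (fun d i =>
        -- s = dirs[i]; i is always in range here, so the pyGetD default is never used
        d.modify (PySem.Str.count (PySem.List.pyGetD dirs i "") "/") []
          (· ++ [PySem.List.pyGetD dirs i ""]))
      PySem.Dict.empty
  -- for key in sorted(dict.keys()): dict.get(key).sort(); for j in dict.get(key): sorted_dirs.append(j)
  (PySem.List.sorted dct.keys (fun k => k) false).foldl
    (fun acc k =>
      (PySem.List.sorted (dct.getD k []) (fun s => s) false).foldl
        (fun a j => a ++ [j]) acc)
    []

-- ===== PORT B =====
def dirsort_alt (dirs : List String) : List String :=
  PySem.List.sorted2 dirs (fun d => PySem.Str.count d "/") (fun d => d) false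

-- ===== PRECONDITION & SPEC =====
def Spec_dirsort (dirs : List String) (out : List String) : Prop := out = dirsort_alt dirs
instance (dirs : List String) (out : List String) : Decidable (Spec_dirsort dirs out) := by unfold Spec_dirsort; infer_instance

-- ===== CLAIM (what is proved, stated in full; the proofs are below) =====
def Claim_equal_dirsort : Prop := ∀ (dirs : List String), Dom_dirsort dirs → Spec_dirsort dirs (dirsort dirs)

-- ===== LEMMAS AND PROOFS =====

-- the composite key both programs order by
def pvKeyL (s : String) : Lex (Nat × String) := toLex (PySem.Str.count s "/", s)

theorem pvKeyL_injective : Function.Injective pvKeyL := by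
  intro a b h
  have := congrArg (fun p => (ofLex p).2) h
  simpa [pvKeyL] using this

-- B's sort is the plain sort by pvKeyL
theorem dirsort_alt_eq_sorted (dirs : List String) :
    dirsort_alt dirs = PySem.List.sorted dirs pvKeyL false := by
  have hfun : (fun (a b : String) =>
      decide (PySem.Str.count a "/" < PySem.Str.count b "/") ||
        (!decide (PySem.Str.count b "/" < PySem.Str.count a "/") && decide (a < b)))
      = fun a b => decide (pvKeyL a < pvKeyL b) := by
    funext a b
    simp only [pvKeyL, Prod.Lex.toLex_lt_toLex]
    set n := PySem.Str.count a "/" with hn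
    set m := PySem.Str.count b "/" with hm
    rcases Nat.lt_trichotomy n m with h | h | h
    · simp [h, Nat.lt_asymm h]
    · simp [h]
    · simp [Nat.lt_asymm h, h, (Nat.ne_of_lt h).symm]
  rw [PySem.List.sorted_eq_foldl_insertBy]
  show dirs.foldl (fun acc x => PySem.List.insertBy (fun a b =>
      decide (PySem.Str.count a "/" < PySem.Str.count b "/") ||
        (!decide (PySem.Str.count b "/" < PySem.Str.count a "/") && decide (a < b))) x acc) []
    = dirs.foldl (fun acc x => PySem.List.insertBy (fun a b =>
      decide (pvKeyL a < pvKeyL b)) x acc) []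
  rw [hfun]

-- the bucket a defaultdict-append loop builds for key k is the filter
theorem pv_bucket (l : List String) (d : PySem.Dict Nat (List String)) (k : Nat) :
    (l.foldl (fun d s => d.modify (PySem.Str.count s "/") [] (· ++ [s])) d).getD k []
      = d.getD k [] ++ l.filter (fun s => PySem.Str.count s "/" == k) := by
  induction l generalizing d with
  | nil => simp
  | cons s t ih =>
    simp only [List.foldl_cons, ih, List.filter_cons]
    rw [PySem.Dict.getD_modify]
    by_cases h : PySem.Str.count s "/" = k
    · subst h; simp
    · rw [if_neg (Ne.symm h), if_neg (by simpa using h)]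

-- a nodup key list covering all slash-counts of l concatenates its buckets to a permutation of l
theorem pv_flatMap_perm (ks : List Nat) (hnd : ks.Nodup) :
    ∀ (l : List String), (∀ s ∈ l, PySem.Str.count s "/" ∈ ks) →
      (ks.flatMap (fun k => l.filter (fun s => PySem.Str.count s "/" == k))).Perm l := by
  induction ks with
  | nil =>
    intro l hcov
    have : l = [] := by
      cases l with
      | nil => rfl
      | cons a t => exact absurd (hcov a (by simp)) (by simp)
    simp [this]
  | cons k ks ih =>
    intro l hcov
    have hk : k ∉ ks := (List.nodup_cons.mp hnd).1
    have hnd' : ks.Nodup := (List.nodup_cons.mp hnd).2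
    rw [List.flatMap_cons]
    set l' := l.filter (fun s => !(PySem.Str.count s "/" == k)) with hl'
    have hrw : ∀ k' ∈ ks,
        l.filter (fun s => PySem.Str.count s "/" == k')
          = l'.filter (fun s => PySem.Str.count s "/" == k') := by
      intro k' hk'
      have hne : k' ≠ k := fun h => hk (h ▸ hk')
      rw [hl', List.filter_filter]
      apply List.filter_congr
      intro s _
      set c := PySem.Str.count s "/" with hc
      by_cases h : c = k'
      · simp [h, hne]
      · simp [h]
    have hmapeq : (ks.flatMap (fun k' => l.filter (fun s => PySem.Str.count s "/" == k')))
        = ks.flatMap (fun k' => l'.filter (fun s => PySem.Str.count s "/" == k')) := by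
      simp only [List.flatMap_def]
      exact congrArg List.flatten (List.map_congr_left hrw)
    rw [hmapeq]
    have hcov' : ∀ s ∈ l', PySem.Str.count s "/" ∈ ks := by
      intro s hs
      rw [hl'] at hs
      have hmem := (List.mem_filter.mp hs).1
      have hne : PySem.Str.count s "/" ≠ k := by
        have h2 := (List.mem_filter.mp hs).2
        simp only [Bool.not_eq_true', beq_eq_false_iff_ne, ne_eq] at h2
        exact h2
      rcases List.mem_cons.mp (hcov s hmem) with h | h
      · exact absurd h hne
      · exact h
    have hperm := ih hnd' l' hcov'
    exact (hperm.append_left _).trans (List.filter_append_perm _ l)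

-- A's result is a permutation of dirs ordered (non-strictly) by pvKeyL; so is B's;
-- pvKeyL is injective, so they coincide.
theorem dirsort_eq_alt (dirs : List String) : dirsort dirs = dirsort_alt dirs := by
  unfold dirsort
  have hstep : (PySem.List.pyRange 0 (PySem.List.len dirs) 1).foldl
      (fun (d : PySem.Dict Nat (List String)) i =>
        d.modify (PySem.Str.count (PySem.List.pyGetD dirs i "") "/") []
          (· ++ [PySem.List.pyGetD dirs i ""])) PySem.Dict.empty
      = dirs.foldl (fun d s => d.modify (PySem.Str.count s "/") [] (· ++ [s]))
          PySem.Dict.empty :=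
    PySem.List.foldl_pyRange_zero_pyGetD dirs ""
      (fun d s => d.modify (PySem.Str.count s "/") [] (· ++ [s])) PySem.Dict.empty
  rw [hstep]
  set dct := dirs.foldl (fun d s => d.modify (PySem.Str.count s "/") [] (· ++ [s]))
      PySem.Dict.empty with hdct
  have hbucket : ∀ k, dct.getD k [] = dirs.filter (fun s => PySem.Str.count s "/" == k) := by
    intro k; rw [hdct, pv_bucket]; simp
  have hkeys : dct.keys = PySem.Set.ofList (dirs.map (fun s => PySem.Str.count s "/")) := by
    rw [hdct, PySem.Dict.keys_foldl_modify_key dirs (fun s => PySem.Str.count s "/") []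
        (fun _ s v => v ++ [s]) PySem.Dict.empty]
    rfl
  have hmemkeys : ∀ k, k ∈ dct.keys ↔ k ∈ dirs.map (fun s => PySem.Str.count s "/") := by
    intro k; rw [hkeys]; exact PySem.Set.mem_ofList _ k
  have hndkeys : dct.keys.Nodup := by
    rw [hkeys]; exact PySem.Set.nodup_ofList _
  set sk := PySem.List.sorted dct.keys (fun k => k) false with hsk
  -- the double append loop is a flatMap over the sorted keys
  have hfold : sk.foldl
      (fun acc k => (PySem.List.sorted (dct.getD k []) (fun s => s) false).foldl
          (fun a j => a ++ [j]) acc) []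
      = sk.flatMap (fun k => PySem.List.sorted (dct.getD k []) (fun s => s) false) := by
    have h1 : ∀ (acc : List String) (k : Nat),
        (PySem.List.sorted (dct.getD k []) (fun s => s) false).foldl
            (fun a j => a ++ [j]) acc
          = acc ++ PySem.List.sorted (dct.getD k []) (fun s => s) false := by
      intro acc k; exact PySem.List.foldl_append_singleton_eq_self _ acc
    calc sk.foldl (fun acc k => (PySem.List.sorted (dct.getD k []) (fun s => s) false).foldl
            (fun a j => a ++ [j]) acc) []
        = sk.foldl (fun acc k => acc ++ PySem.List.sorted (dct.getD k []) (fun s => s) false) [] := by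
          exact PySem.List.foldl_congr_mem sk _ _ [] (fun acc k _ => h1 acc k)
      _ = [] ++ sk.flatMap (fun k => PySem.List.sorted (dct.getD k []) (fun s => s) false) :=
          PySem.List.foldl_append_eq_flatMap _ sk []
      _ = _ := by simp
  rw [hfold]
  set res := sk.flatMap (fun k => PySem.List.sorted (dct.getD k []) (fun s => s) false) with hres
  -- facts about the sorted key list
  have hskperm : sk.Perm dct.keys := PySem.List.sorted_perm _ _ _
  have hsknd : sk.Nodup := hskperm.nodup_iff.mpr hndkeys
  have hskle : sk.Pairwise (fun a b => a ≤ b) := by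
    simpa using PySem.List.sorted_pairwise dct.keys (fun k => k)
  have hsklt : sk.Pairwise (fun a b => a < b) := by
    have := List.Pairwise.and hskle (by
      simpa [List.nodup_iff_pairwise_ne] using hsknd : sk.Pairwise (fun a b => a ≠ b))
    exact this.imp (fun h => lt_of_le_of_ne h.1 h.2)
  have hskmem : ∀ k, k ∈ sk ↔ k ∈ dirs.map (fun s => PySem.Str.count s "/") := by
    intro k; rw [hskperm.mem_iff]; exact hmemkeys k
  -- (1) res is a permutation of dirs
  have hpermres : res.Perm dirs := by
    have h1 : res.Perm (sk.flatMap (fun k => dirs.filter (fun s => PySem.Str.count s "/" == k))) := by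
      rw [hres]
      apply List.Perm.flatMap_left
      intro k _
      rw [hbucket k]
      exact PySem.List.sorted_perm _ _ _
    have h2 := pv_flatMap_perm sk hsknd dirs (by
      intro s hs
      exact (hskmem _).mpr (List.mem_map.mpr ⟨s, hs, rfl⟩))
    exact h1.trans h2
  -- (2) res is pairwise nondecreasing under pvKeyL
  have hcnt : ∀ k, ∀ x ∈ PySem.List.sorted (dct.getD k []) (fun s => s) false,
      PySem.Str.count x "/" = k := by
    intro k x hx
    have := (PySem.List.mem_sorted _ _ _ x).mp hx
    rw [hbucket k] at this
    simpa using (List.mem_filter.mp this).2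
  have hpwres : res.Pairwise (fun a b => pvKeyL a ≤ pvKeyL b) := by
    rw [hres, List.pairwise_flatMap]
    constructor
    · intro k hk
      have hpw : (PySem.List.sorted (dct.getD k []) (fun s => s) false).Pairwise
          (fun a b => a ≤ b) := by
        simpa using PySem.List.sorted_pairwise (dct.getD k []) (fun s => s)
      refine hpw.imp_of_mem ?_
      intro a b ha hb hab
      have hca := hcnt k a ha
      have hcb := hcnt k b hb
      simp only [pvKeyL, Prod.Lex.toLex_le_toLex]
      exact Or.inr ⟨hca.trans hcb.symm, hab⟩
    · refine hsklt.imp_of_mem ?_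
      intro k₁ k₂ _ _ hlt x hx y hy
      have hx' := hcnt k₁ x hx
      have hy' := hcnt k₂ y hy
      simp only [pvKeyL, Prod.Lex.toLex_le_toLex]
      rw [hx', hy']
      exact Or.inl hlt
  -- (3) B's result has the same two properties, and the key is injective
  rw [dirsort_alt_eq_sorted]
  have hpermB : (PySem.List.sorted dirs pvKeyL false).Perm dirs := PySem.List.sorted_perm _ _ _
  have hpwB : (PySem.List.sorted dirs pvKeyL false).Pairwise (fun a b => pvKeyL a ≤ pvKeyL b) := by
    simpa using PySem.List.sorted_pairwise dirs pvKeyL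
  exact PySem.List.eq_of_perm_of_pairwise_le_of_injective pvKeyL pvKeyL_injective
    (hpermres.trans hpermB.symm) hpwres hpwB

-- ===== VERDICT (by name: the statement is the Claim_ definition above) =====
theorem dirsort_spec : Claim_equal_dirsort := by
  intro dirs _
  unfold Spec_dirsort
  exact dirsort_eq_alt dirs
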